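-- pv_equiv track=rewrite | github.com/VanXNF/MLHK | hw_1.py | transfer_dataset
-- ===== SOURCE A (Python) =====
-- def transfer_dataset(src_dataset):
--     """
--     将二维数据转换为可读的 DNA 序列\n
--     :param src_dataset: 原始数据集
--     :return: target_dataset 转换后数据集
--     """
--     key_map = {'100': 'A', '010': 'C', '001': 'G', '000': 'T'}
--     target_dataset = []
--     for item in src_dataset:
--         key = ''
--         index = 0
--         chips = []
--         for chip in item:
--             if index < 3:
--                 key += str(chip)
--                 index += 1
--                 if index == 3:
--                     chips.append(key_map.get(key))
--             else:
--                 key = str(chip)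
--                 index = 1
--         target_dataset.append(chips)
--     return target_dataset
-- ===== SOURCE B (Python) =====
-- def transfer_dataset(src_dataset):
--     """Same conversion, but via the idiomatic grouper idiom: zip the same
--     iterator three times to walk each item in chunks of 3 (dropping any
--     trailing partial chunk), instead of A's per-element counter state machine."""
--     key_map = {'100': 'A', '010': 'C', '001': 'G', '000': 'T'}
--     target_dataset = []
--     for item in src_dataset:
--         it = iter(item)
--         target_dataset.append([key_map.get(str(a) + str(b) + str(c))
--                                for a, b, c in zip(it, it, it)])
--     return target_dataset
-- ===== Notes on version B (the rewrite author's own statement) =====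
-- stated objective: idiomatic
-- what changed: Replaces A's per-element counter/key-accumulator state machine with the standard grouper idiom (zip of the same iterator three times) that walks each item directly in chunks of 3 and maps each chunk through key_map.get.
import Mathlib
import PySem

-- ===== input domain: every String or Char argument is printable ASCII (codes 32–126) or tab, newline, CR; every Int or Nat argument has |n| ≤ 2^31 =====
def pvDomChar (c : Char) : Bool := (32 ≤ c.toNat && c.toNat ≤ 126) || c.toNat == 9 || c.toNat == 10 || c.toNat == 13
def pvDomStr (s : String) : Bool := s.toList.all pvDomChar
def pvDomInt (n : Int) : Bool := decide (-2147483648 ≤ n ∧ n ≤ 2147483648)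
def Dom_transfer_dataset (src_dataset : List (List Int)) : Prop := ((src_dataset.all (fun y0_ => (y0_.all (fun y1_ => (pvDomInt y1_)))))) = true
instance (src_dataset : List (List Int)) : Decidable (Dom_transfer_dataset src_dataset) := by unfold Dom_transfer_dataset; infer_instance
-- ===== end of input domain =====

-- B replaces A's per-element counter/key-accumulator state machine by the grouper idiom
-- (zip of one iterator thrice = chunks of 3); same return value, proved below.

-- ===== PORT A =====
def pvKeyMap : PySem.Dict String String :=
  PySem.Dict.ofList [("100", "A"), ("010", "C"), ("001", "G"), ("000", "T")]

-- one step of A's inner 'for chip in item' loop over state (key, index, chips)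
def pvStepA (s : String × Int × List (Option String)) (chip : Int) :
    String × Int × List (Option String) :=
  let (key, index, chips) := s
  if index < 3 then
    let key := key ++ PySem.Int.toStr chip
    let index := index + 1
    if index = 3 then (key, index, chips ++ [pvKeyMap.get? key]) else (key, index, chips)
  else (PySem.Int.toStr chip, 1, chips)

def transfer_dataset (src_dataset : List (List Int)) : List (List (Option String)) :=
  src_dataset.foldl
    (fun target_dataset item => target_dataset ++ [(item.foldl pvStepA ("", 0, [])).2.2]) []

-- ===== PORT B =====
-- zip(it, it, it) over one iterator of item: successive chunks of 3, trailing <3 dropped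
def pvGroup3 : List Int → List (Int × Int × Int)
  | a :: b :: c :: rest => (a, b, c) :: pvGroup3 rest
  | _ => []

def transfer_dataset_alt (src_dataset : List (List Int)) : List (List (Option String)) :=
  src_dataset.foldl
    (fun target_dataset item =>
      target_dataset ++
        [(pvGroup3 item).map (fun g =>
          pvKeyMap.get? (PySem.Int.toStr g.1 ++ PySem.Int.toStr g.2.1 ++ PySem.Int.toStr g.2.2))])
    []

-- ===== PRECONDITION & SPEC =====
def Spec_transfer_dataset (src_dataset : List (List Int)) (out : List (List (Option String))) : Prop := out = transfer_dataset_alt src_dataset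
instance (src_dataset : List (List Int)) (out : List (List (Option String))) : Decidable (Spec_transfer_dataset src_dataset out) := by unfold Spec_transfer_dataset; infer_instance

-- ===== CLAIM (what is proved, stated in full; the proofs are below) =====
def Claim_equal_transfer_dataset : Prop := ∀ (src_dataset : List (List Int)), Dom_transfer_dataset src_dataset → Spec_transfer_dataset src_dataset (transfer_dataset src_dataset)

-- ===== LEMMAS AND PROOFS =====

-- both ports' outer loops: appending folds are maps
theorem pvFoldlAppend {α β : Type} (f : α → β) (l : List α) (acc : List β) :
    l.foldl (fun t i => t ++ [f i]) acc = acc ++ l.map f := by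
  induction l generalizing acc with
  | nil => simp
  | cons a t ih => simp [List.foldl, ih]

-- after a completed triple (index = 3) the next chip resets the key,
-- exactly as from the fresh state (index = 0): only .2.2 (chips) is consumed
theorem pvStepA_reset (l : List Int) (key : String) (chips : List (Option String)) :
    (l.foldl pvStepA (key, 3, chips)).2.2 = (l.foldl pvStepA ("", 0, chips)).2.2 := by
  cases l with
  | nil => rfl
  | cons a t =>
    simp only [List.foldl, pvStepA]
    norm_num

-- A's inner loop, started fresh with accumulator `chips`, appends B's chunk values
theorem pvInner (l : List Int) (chips : List (Option String)) :
    (l.foldl pvStepA ("", 0, chips)).2.2 =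
      chips ++ (pvGroup3 l).map (fun g =>
        pvKeyMap.get? (PySem.Int.toStr g.1 ++ PySem.Int.toStr g.2.1 ++ PySem.Int.toStr g.2.2)) := by
  induction l using pvGroup3.induct generalizing chips with
  | case1 a b c rest ih =>
    simp only [List.foldl, pvStepA]
    norm_num
    rw [pvStepA_reset, ih]
    simp [pvGroup3]
  | case2 l h =>
    rcases l with _ | ⟨a, _ | ⟨b, _ | ⟨c, t⟩⟩⟩
    · simp [pvGroup3]
    · simp [List.foldl, pvStepA, pvGroup3]
    · simp [List.foldl, pvStepA, pvGroup3]
    · exact absurd rfl (h a b c t)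

-- ===== VERDICT (by name: the statement is the Claim_ definition above) =====
theorem transfer_dataset_spec : Claim_equal_transfer_dataset := by
  intro src _
  unfold Spec_transfer_dataset transfer_dataset transfer_dataset_alt
  rw [pvFoldlAppend (fun item => (item.foldl pvStepA ("", 0, [])).2.2) src [],
      pvFoldlAppend _ src []]
  simp only [List.nil_append]
  exact List.map_congr_left (fun item _ => by simpa using pvInner item [])
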